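-- pv_equiv track=rewrite | github.com/Jsundstrom0223/should_it_be_hyphenated | entry_parser.py | is_stem
-- ===== SOURCE A (Python) =====
-- def check_alt_forms(search_term_chars, field_value):
--     """Check whether an entry's va, inf, or stems field contains a form of the search term.
--
--     Arguments:
--     search_term: The search term used in the API call (an element of the compound).
--     field_value: The va, inf, or stems field of an entry.
--
--     Returns:
--     match: A boolean value. True means that the search term is a variant, inflection, or
--     stem of an open or hyphenated compound.
--     """
--     match = False
--     splitters = [" ", "-"]
--     for splitter in splitters:
--         if not match:
--             for i, _ in enumerate(search_term_chars):
--                 first_ele = "".join(search_term_chars[: i+1])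
--                 second_ele = "".join(search_term_chars[i + 1:])
--                 both = first_ele + splitter + second_ele
--                 if both == field_value:
--                     match = True
--
--     return match
--
-- def is_stem(stems, search_term):
--     """Check whether a dictionary entry's stems field contains the search term.
--
--     Arguments:
--     stems: The stems field of an entry.
--     search_term: The search term used in the API call (an element of the compound).
--
--     Returns:
--     term_is_stem: A boolean. True means that the field contains the search term.
--     """
--     term_is_stem = False
--     if search_term in stems:
--         term_is_stem = True
--     else:
--         to_check = list(search_term)
--
--         for stem in stems:
--             if not term_is_stem:
--                 term_is_stem = check_alt_forms(to_check, stem)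
--
--     return term_is_stem
-- ===== SOURCE B (Python) =====
-- def _lcp(xs, ys):
--     """Length of the longest common prefix of two sequences."""
--     p = 0
--     m = min(len(xs), len(ys))
--     while p < m and xs[p] == ys[p]:
--         p += 1
--     return p
--
-- def _alt_form_check(t, stem):
--     """Is stem equal to t with one space/hyphen inserted at position 1..len(t)?"""
--     n = len(t)
--     if len(stem) != n + 1:
--         return False
--     p = _lcp(t, stem)
--     s = _lcp(t[::-1], stem[::-1])
--     lo = max(1, n - s)
--     hi = min(p, n)
--     return any(stem[k] in " -" for k in range(lo, hi + 1))
--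
-- def is_stem(stems, search_term):
--     if search_term in stems:
--         return True
--     return any(_alt_form_check(search_term, stem) for stem in stems)
-- ===== Notes on version B (the rewrite author's own statement) =====
-- stated objective: faster
-- what changed: Instead of generating every one-separator insertion of the search term for each stem (quadratic per stem), B computes the longest common prefix and suffix of the stem and the term once and checks whether any position in the feasible insertion window holds a space or hyphen (linear per stem).
import Mathlib
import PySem

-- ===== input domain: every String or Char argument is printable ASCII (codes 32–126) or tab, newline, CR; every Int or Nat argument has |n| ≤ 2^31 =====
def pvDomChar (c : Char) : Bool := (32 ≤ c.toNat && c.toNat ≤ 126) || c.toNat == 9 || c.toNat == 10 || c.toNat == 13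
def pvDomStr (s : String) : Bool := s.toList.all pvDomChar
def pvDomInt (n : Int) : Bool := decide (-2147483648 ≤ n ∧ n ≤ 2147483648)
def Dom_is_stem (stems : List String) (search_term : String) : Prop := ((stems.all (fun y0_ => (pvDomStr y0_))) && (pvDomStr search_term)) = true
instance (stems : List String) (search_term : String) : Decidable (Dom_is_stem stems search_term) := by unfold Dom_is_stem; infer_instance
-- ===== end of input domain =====

-- B replaces A's per-stem generation of all one-separator insertions of the search term
-- by a longest-common-prefix/suffix window check; objective: faster.


-- ===== PORT A =====
-- Python string concatenation / "".join / string == are modelled over List Char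
-- (Python string equality coincides with equality of the character lists); exact there.
def check_alt_forms (search_term_chars : List Char) (field_value : List Char) : Bool :=
  let splitters : List (List Char) := [[' '], ['-']]
  splitters.foldl (fun mtch splitter =>
    if !mtch then
      (List.range search_term_chars.length).foldl (fun m i =>
        let first_ele := search_term_chars.take (i + 1)
        let second_ele := search_term_chars.drop (i + 1)
        let both := first_ele ++ splitter ++ second_ele
        if both = field_value then true else m) mtch
    else mtch) false

def is_stem (stems : List String) (search_term : String) : Bool :=
  if stems.contains search_term then true
  else
    let to_check := search_term.toList
    stems.foldl (fun term_is_stem stem =>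
      if !term_is_stem then check_alt_forms to_check stem.toList else term_is_stem) false

-- ===== PORT B =====
-- _lcp of Source B: length of the longest common prefix of two character lists.
def lcpLen : List Char → List Char → Nat
  | a :: as, b :: bs => if a = b then lcpLen as bs + 1 else 0
  | _, _ => 0

-- _alt_form_check of Source B: stem = t with one separator inserted at position 1..len t?
def altFormCheck (t st : List Char) : Bool :=
  if st.length ≠ t.length + 1 then false
  else
    let p := lcpLen t st
    let s := lcpLen t.reverse st.reverse
    let lo := max 1 (t.length - s)
    let hi := min p t.length
    (List.range' lo (hi + 1 - lo)).any (fun k => st.getD k ' ' == ' ' || st.getD k ' ' == '-')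

def is_stem_alt (stems : List String) (search_term : String) : Bool :=
  if stems.contains search_term then true
  else stems.any (fun stem => altFormCheck search_term.toList stem.toList)

-- ===== PRECONDITION & SPEC =====
def Spec_is_stem (stems : List String) (search_term : String) (out : Bool) : Prop := out = is_stem_alt stems search_term
instance (stems : List String) (search_term : String) (out : Bool) : Decidable (Spec_is_stem stems search_term out) := by unfold Spec_is_stem; infer_instance

-- ===== CLAIM (what is proved, stated in full; the proofs are below) =====
def Claim_equal_is_stem : Prop := ∀ (stems : List String) (search_term : String), Dom_is_stem stems search_term → Spec_is_stem stems search_term (is_stem stems search_term)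

-- ===== LEMMAS AND PROOFS =====

theorem foldl_or {α : Type} (g : α → Bool) : ∀ (l : List α) (b : Bool),
    l.foldl (fun m x => m || g x) b = (b || l.any g) := by
  intro l
  induction l with
  | nil => intro b; simp
  | cons x xs ih => intro b; simp [List.foldl_cons, ih, Bool.or_assoc]

-- A's outer flag loops are `any`
theorem foldl_flag {α : Type} (g : α → Bool) (l : List α) (b : Bool) :
    l.foldl (fun m x => if !m then g x else m) b = (b || l.any g) := by
  rw [show (fun (m : Bool) x => if !m then g x else m) = (fun m x => m || g x) from
    funext fun m => funext fun x => by cases m <;> simp]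
  exact foldl_or g l b

-- A's inner check, characterised as an existence statement
theorem checkA_iff (t fv : List Char) :
    check_alt_forms t fv = true ↔
      ∃ c, (c = ' ' ∨ c = '-') ∧ ∃ i < t.length, t.take (i + 1) ++ c :: t.drop (i + 1) = fv := by
  have hone : ∀ (sp : List Char) (b : Bool),
      (List.range t.length).foldl
          (fun m i => if t.take (i + 1) ++ sp ++ t.drop (i + 1) = fv then true else m) b
        = (b || (List.range t.length).any
            (fun i => decide (t.take (i + 1) ++ sp ++ t.drop (i + 1) = fv))) := by
    intro sp b
    rw [show (fun (m : Bool) i => if t.take (i + 1) ++ sp ++ t.drop (i + 1) = fv then true else m)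
          = (fun (m : Bool) i => m || decide (t.take (i + 1) ++ sp ++ t.drop (i + 1) = fv)) from
      funext fun m => funext fun i => by
        by_cases h : t.take (i + 1) ++ sp ++ t.drop (i + 1) = fv <;> simp [h, Bool.or_comm]]
    exact foldl_or _ _ _
  unfold check_alt_forms
  simp only [List.foldl_cons, List.foldl_nil]
  simp only [hone, Bool.false_or, Bool.not_false, reduceIte]
  rw [show ∀ (a b : Bool), (if !a then a || b else a) = (a || b) from by decide]
  simp only [Bool.or_eq_true, List.any_eq_true, List.mem_range, decide_eq_true_eq]
  constructor
  · rintro (⟨i, hi, he⟩ | ⟨i, hi, he⟩)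
    · exact ⟨' ', Or.inl rfl, i, hi, by simpa using he⟩
    · exact ⟨'-', Or.inr rfl, i, hi, by simpa using he⟩
  · rintro ⟨c, hc, i, hi, he⟩
    rcases hc with rfl | rfl
    · exact Or.inl ⟨i, hi, by simpa using he⟩
    · exact Or.inr ⟨i, hi, by simpa using he⟩

-- lcpLen basics
theorem take_lcpLen_eq : ∀ (xs ys : List Char), xs.take (lcpLen xs ys) = ys.take (lcpLen xs ys) := by
  intro xs
  induction xs with
  | nil => intro ys; simp [lcpLen]
  | cons a as ih =>
    intro ys
    cases ys with
    | nil => simp [lcpLen]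
    | cons b bs =>
      by_cases h : a = b <;> simp [lcpLen, h, ih bs]

theorem le_lcpLen_of_take_eq : ∀ (xs ys : List Char) (j : Nat), j ≤ xs.length →
    xs.take j = ys.take j → j ≤ lcpLen xs ys := by
  intro xs
  induction xs with
  | nil =>
    intro ys j hj _
    simp at hj
    simp [hj]
  | cons a as ih =>
    intro ys j hj heq
    cases j with
    | zero => exact Nat.zero_le _
    | succ jj =>
      cases ys with
      | nil => simp at heq
      | cons b bs =>
        simp [List.take] at heq
        obtain ⟨hab, htl⟩ := heq
        simp only [lcpLen, hab, if_pos]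
        exact Nat.succ_le_succ (ih bs jj (by simpa using hj) htl)

theorem take_eq_iff_le_lcpLen (xs ys : List Char) (j : Nat) (hj : j ≤ xs.length) :
    xs.take j = ys.take j ↔ j ≤ lcpLen xs ys := by
  constructor
  · exact le_lcpLen_of_take_eq xs ys j hj
  · intro h
    calc xs.take j = (xs.take (lcpLen xs ys)).take j := by
            rw [List.take_take, Nat.min_eq_left h]
      _ = (ys.take (lcpLen xs ys)).take j := by rw [take_lcpLen_eq]
      _ = ys.take j := by rw [List.take_take, Nat.min_eq_left h]

-- getD of an append at the junction
theorem getD_append_len (l1 l2 : List Char) (c : Char) :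
    (l1 ++ c :: l2).getD l1.length ' ' = c := by
  induction l1 with
  | nil => rfl
  | cons a as ih => simp only [List.cons_append, List.length_cons, List.getD_cons_succ]; exact ih

-- the heart: "st is t with c inserted at position k" in prefix/suffix terms
theorem insert_eq_iff (t st : List Char) (c : Char) (k : Nat)
    (h1 : 1 ≤ k) (hk : k ≤ t.length) (hlen : st.length = t.length + 1) :
    t.take k ++ c :: t.drop k = st ↔
      (k ≤ lcpLen t st ∧ t.length - lcpLen t.reverse st.reverse ≤ k ∧ st.getD k ' ' = c) := by
  have hkst : k < st.length := by omega
  have hlk : (t.take k).length = k := by simp; omega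
  constructor
  · intro h
    have htake : t.take k = st.take k := by
      have h2 := List.take_left (l₁ := t.take k) (l₂ := c :: t.drop k)
      rw [hlk, h] at h2
      exact h2.symm
    have hget : st.getD k ' ' = c := by
      have h2 := getD_append_len (t.take k) (t.drop k) c
      rw [hlk, h] at h2
      exact h2
    have hdrop : st.drop (k + 1) = t.drop k := by
      have h2 := List.drop_length_add_append (i := 1) (l₁ := t.take k) (l₂ := c :: t.drop k)
      rw [hlk, h] at h2
      simpa using h2
    have hsuf : t.length - k ≤ lcpLen t.reverse st.reverse := by
      apply le_lcpLen_of_take_eq _ _ _ (by rw [List.length_reverse]; exact Nat.sub_le t.length k)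
      calc t.reverse.take (t.length - k) = (t.drop k).reverse := List.reverse_drop.symm
        _ = (st.drop (k + 1)).reverse := by rw [hdrop]
        _ = st.reverse.take (st.length - (k + 1)) := List.reverse_drop
        _ = st.reverse.take (t.length - k) := by
              rw [show st.length - (k + 1) = t.length - k from by omega]
    refine ⟨(take_eq_iff_le_lcpLen t st k hk).mp htake, by omega, hget⟩
  · rintro ⟨hp, hs, hg⟩
    have htake : t.take k = st.take k := (take_eq_iff_le_lcpLen t st k hk).mpr hp
    have hsuf : t.reverse.take (t.length - k) = st.reverse.take (t.length - k) := by
      apply (take_eq_iff_le_lcpLen t.reverse st.reverse (t.length - k)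
        (by rw [List.length_reverse]; exact Nat.sub_le t.length k)).mpr
      omega
    have hdrop : t.drop k = st.drop (k + 1) := by
      apply List.reverse_inj.mp
      calc (t.drop k).reverse = t.reverse.take (t.length - k) := List.reverse_drop
        _ = st.reverse.take (t.length - k) := hsuf
        _ = st.reverse.take (st.length - (k + 1)) := by rw [show st.length - (k + 1) = t.length - k from by omega]
        _ = (st.drop (k + 1)).reverse := List.reverse_drop.symm
    have hgel : st[k]'hkst = c := by
      rw [← List.getD_eq_getElem st ' ' hkst]; exact hg
    calc t.take k ++ c :: t.drop k = st.take k ++ st[k]'hkst :: st.drop (k + 1) := by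
          rw [htake, hdrop, hgel]
      _ = st.take k ++ st.drop k := by rw [List.getElem_cons_drop hkst]
      _ = st := List.take_append_drop k st

-- per-stem: A's check equals B's check
theorem perstem_eq (t st : List Char) : check_alt_forms t st = altFormCheck t st := by
  rw [Bool.eq_iff_iff, checkA_iff]
  by_cases hl : st.length = t.length + 1
  · have hB : altFormCheck t st =
        ((List.range' (max 1 (t.length - lcpLen t.reverse st.reverse))
            (min (lcpLen t st) t.length + 1
              - max 1 (t.length - lcpLen t.reverse st.reverse))).any
          (fun k => st.getD k ' ' == ' ' || st.getD k ' ' == '-')) := by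
      unfold altFormCheck
      rw [if_neg (by omega)]
    rw [hB, List.any_eq_true]
    constructor
    · rintro ⟨c, hc, i, hi, he⟩
      obtain ⟨hp, hs, hg⟩ :=
        (insert_eq_iff t st c (i + 1) (by omega) (by omega) hl).mp he
      refine ⟨i + 1, ?_, ?_⟩
      · rw [List.mem_range'_1]
        omega
      · simp only [Bool.or_eq_true, beq_iff_eq]
        rcases hc with rfl | rfl
        · exact Or.inl hg
        · exact Or.inr hg
    · rintro ⟨k, hmem, hsep⟩
      rw [List.mem_range'_1] at hmem
      have h1 : 1 ≤ k := by omega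
      have hk : k ≤ t.length := by omega
      have hp : k ≤ lcpLen t st := by omega
      have hs : t.length - lcpLen t.reverse st.reverse ≤ k := by omega
      simp only [Bool.or_eq_true, beq_iff_eq] at hsep
      refine ⟨st.getD k ' ', hsep, k - 1, by omega, ?_⟩
      rw [show k - 1 + 1 = k from by omega]
      exact (insert_eq_iff t st _ k h1 hk hl).mpr ⟨hp, hs, rfl⟩
  · have hB : altFormCheck t st = false := by
      unfold altFormCheck
      rw [if_pos (by omega)]
    rw [hB]
    simp only [Bool.false_eq_true, iff_false]
    rintro ⟨c, _, i, hi, he⟩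
    apply hl
    rw [← he]
    simp

-- ===== VERDICT (by name: the statement is the Claim_ definition above) =====
theorem is_stem_spec : Claim_equal_is_stem := by
  intro stems term _
  unfold Spec_is_stem is_stem is_stem_alt
  cases hc : stems.contains term with
  | true => simp
  | false =>
    simp only [Bool.false_eq_true, reduceIte]
    rw [foldl_flag, Bool.false_or]
    congr 1
    funext stem
    exact perstem_eq term.toList stem.toList
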